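-- pv_equiv track=rewrite | github.com/ghjang/adnim | exercise/ch_01_02.py | factors_to_latex
-- ===== SOURCE A (Python) =====
-- from collections import Counter
-- from typing import List
--
-- def factors_to_latex(factors: List[int]) -> str:
--     """소인수분해 결과 리스트를 LaTeX 거듭제곱 표현 문자열로 변환
--
--     Args:
--         factors (List[int]): factorize 함수로 구한 소인수 리스트
--
--     Returns:
--         str: LaTeX 형식의 거듭제곱 표현 문자열
--     """
--     if not factors:
--         return ''
--
--     factor_counts = Counter(factors)
--
--     # 각 인수를 LaTeX 거듭제곱 형식으로 변환
--     latex_terms = []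
--     for factor, count in sorted(factor_counts.items()):
--         if count == 1:
--             latex_terms.append(str(factor))
--         else:
--             latex_terms.append(f'{factor}^{{{count}}}')
--
--     # 모든 항을 \cdot으로 연결
--     return r' \cdot '.join(latex_terms)
-- ===== SOURCE B (Python) =====
-- def _term(factor, count):
--     return str(factor) if count == 1 else f'{factor}^{{{count}}}'
--
-- def factors_to_latex(factors):
--     s = sorted(factors)
--     if not s:
--         return ''
--     terms = []
--     cur = s[0]
--     cnt = 1
--     for x in s[1:]:
--         if x == cur:
--             cnt += 1
--         else:
--             terms.append(_term(cur, cnt))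
--             cur = x
--             cnt = 1
--     terms.append(_term(cur, cnt))
--     return r' \cdot '.join(terms)
-- ===== Notes on version B (the rewrite author's own statement) =====
-- stated objective: alternative
-- what changed: Replaces the Counter hash-count plus sort of (factor,count) items with sort-then-group: one pass over the sorted list tracking the current value and a running count, emitting each LaTeX term as a run ends.
import Mathlib
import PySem

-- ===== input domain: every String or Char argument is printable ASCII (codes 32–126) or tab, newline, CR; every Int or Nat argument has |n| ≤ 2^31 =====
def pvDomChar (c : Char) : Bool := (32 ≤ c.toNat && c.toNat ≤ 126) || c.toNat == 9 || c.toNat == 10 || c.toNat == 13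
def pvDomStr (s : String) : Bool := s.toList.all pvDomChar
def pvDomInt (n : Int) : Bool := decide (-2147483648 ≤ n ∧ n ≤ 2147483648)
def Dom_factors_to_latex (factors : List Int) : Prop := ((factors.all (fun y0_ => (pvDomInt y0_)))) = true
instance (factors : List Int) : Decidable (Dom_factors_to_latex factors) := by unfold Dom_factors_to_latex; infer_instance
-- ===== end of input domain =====

-- B replaces Counter-then-sort-items by sort-then-group (one run-counting pass over the sorted list); same cost, different structure.

-- ===== PORT A =====
-- sorted(factor_counts.items()): Counter keys are distinct, so Python's lexicographic
-- tuple sort coincides exactly with the stable sort by first component used here.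
def factors_to_latex (factors : List Int) : String :=
  if factors = [] then ""
  else
    let factor_counts := PySem.Dict.counter factors
    let latex_terms :=
      (PySem.List.sorted factor_counts.items (fun p => p.1) false).foldl
        (fun acc p =>
          if p.2 = 1 then acc ++ [PySem.Int.toStr p.1]
          else acc ++ [PySem.Int.toStr p.1 ++ "^{" ++ PySem.Int.toStr p.2 ++ "}"]) []
    PySem.Str.join " \\cdot " latex_terms

-- ===== PORT B =====
def bTerm (factor : Int) (count : Int) : String :=
  if count = 1 then PySem.Int.toStr factor
  else PySem.Int.toStr factor ++ "^{" ++ PySem.Int.toStr count ++ "}"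

-- the run-counting loop of Source B: consume the rest of the sorted list, tracking (cur, cnt, terms)
def bLoop (cur : Int) (cnt : Int) (rest : List Int) (terms : List String) : List String :=
  match rest with
  | [] => terms ++ [bTerm cur cnt]
  | x :: rest' =>
      if x = cur then bLoop cur (cnt + 1) rest' terms
      else bLoop x 1 rest' (terms ++ [bTerm cur cnt])

def factors_to_latex_alt (factors : List Int) : String :=
  match PySem.List.sorted factors (fun x => x) false with
  | [] => ""
  | x :: rest => PySem.Str.join " \\cdot " (bLoop x 1 rest [])

-- ===== PRECONDITION & SPEC =====
def Spec_factors_to_latex (factors : List Int) (out : String) : Prop := out = factors_to_latex_alt factors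
instance (factors : List Int) (out : String) : Decidable (Spec_factors_to_latex factors out) := by unfold Spec_factors_to_latex; infer_instance

-- ===== CLAIM (what is proved, stated in full; the proofs are below) =====
def Claim_equal_factors_to_latex : Prop := ∀ (factors : List Int), Dom_factors_to_latex factors → Spec_factors_to_latex factors (factors_to_latex factors)

-- ===== LEMMAS AND PROOFS =====

-- the distinct values of a list, first occurrences in order (proof-side only; fuel recursion)
def rkeysAux : Nat → List Int → List Int
  | 0, _ => []
  | _ + 1, [] => []
  | n + 1, x :: t => x :: rkeysAux n (t.filter (fun y => y ≠ x))

def rkeys (l : List Int) : List Int := rkeysAux l.length l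

theorem rkeysAux_fuel : ∀ (n m : Nat) (l : List Int), l.length ≤ n → l.length ≤ m →
    rkeysAux n l = rkeysAux m l := by
  intro n
  induction n with
  | zero =>
    intro m l hn _
    have : l = [] := List.eq_nil_of_length_eq_zero (Nat.le_zero.mp hn)
    subst this
    cases m <;> rfl
  | succ n ih =>
    intro m l hn hm
    cases l with
    | nil => cases m <;> rfl
    | cons x t =>
      cases m with
      | zero => simp at hm
      | succ m =>
        simp only [rkeysAux]
        congr 1
        have hle := List.length_filter_le (fun y => decide (y ≠ x)) t
        simp only [List.length_cons, Nat.succ_le_succ_iff] at hn hm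
        exact ih m _ (le_trans hle hn) (le_trans hle hm)

theorem rkeys_nil : rkeys [] = [] := rfl

theorem rkeys_cons (x : Int) (t : List Int) :
    rkeys (x :: t) = x :: rkeys (t.filter (fun y => y ≠ x)) := by
  unfold rkeys
  simp only [List.length_cons, rkeysAux]
  congr 1
  exact rkeysAux_fuel t.length _ _ (List.length_filter_le _ t) (le_refl _)

theorem mem_rkeysAux {k : Int} : ∀ (n : Nat) (l : List Int), k ∈ rkeysAux n l → k ∈ l := by
  intro n
  induction n with
  | zero => intro l h; simp [rkeysAux] at h
  | succ n ih =>
    intro l h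
    cases l with
    | nil => simp [rkeysAux] at h
    | cons x t =>
      rcases List.mem_cons.mp h with h | h
      · simp [h]
      · exact List.mem_cons_of_mem _ (List.mem_of_mem_filter (ih _ h))

theorem mem_rkeys {k : Int} {l : List Int} (h : k ∈ rkeys l) : k ∈ l :=
  mem_rkeysAux l.length l h

theorem mem_rkeysAux_of_mem {a : Int} : ∀ (n : Nat) (l : List Int),
    l.length ≤ n → a ∈ l → a ∈ rkeysAux n l := by
  intro n
  induction n with
  | zero =>
    intro l hn h
    have : l = [] := List.eq_nil_of_length_eq_zero (Nat.le_zero.mp hn)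
    subst this; simp at h
  | succ n ih =>
    intro l hn h
    cases l with
    | nil => simp at h
    | cons x t =>
      by_cases hax : a = x
      · simp [rkeysAux, hax]
      · rcases List.mem_cons.mp h with he | ht
        · exact absurd he hax
        · refine List.mem_cons_of_mem _ (ih _ ?_ (List.mem_filter.mpr ⟨ht, by simpa using hax⟩))
          simp only [List.length_cons, Nat.succ_le_succ_iff] at hn
          exact le_trans (List.length_filter_le _ t) hn

theorem mem_rkeys_of_mem {a : Int} {l : List Int} (h : a ∈ l) : a ∈ rkeys l :=
  mem_rkeysAux_of_mem l.length l (le_refl _) h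

theorem nodup_rkeysAux : ∀ (n : Nat) (l : List Int), (rkeysAux n l).Nodup := by
  intro n
  induction n with
  | zero => intro l; simp [rkeysAux]
  | succ n ih =>
    intro l
    cases l with
    | nil => simp [rkeysAux]
    | cons x t =>
      refine List.nodup_cons.mpr ⟨fun h => ?_, ih _⟩
      have := List.of_mem_filter (mem_rkeysAux _ _ h)
      simp at this

theorem nodup_rkeys (l : List Int) : (rkeys l).Nodup := nodup_rkeysAux l.length l

theorem pairwise_lt_rkeysAux : ∀ (n : Nat) (l : List Int),
    l.Pairwise (· ≤ ·) → (rkeysAux n l).Pairwise (· < ·) := by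
  intro n
  induction n with
  | zero => intro l _; simp [rkeysAux]
  | succ n ih =>
    intro l hp
    cases l with
    | nil => simp [rkeysAux]
    | cons x t =>
      rcases List.pairwise_cons.mp hp with ⟨hx, ht⟩
      refine List.pairwise_cons.mpr ⟨?_, ih _ (ht.filter _)⟩
      intro k hk
      have hne : k ≠ x := by
        have := List.of_mem_filter (mem_rkeysAux _ _ hk)
        simpa using this
      have hle : x ≤ k := hx k (List.mem_of_mem_filter (mem_rkeysAux _ _ hk))
      omega

theorem pairwise_lt_rkeys {l : List Int} (h : l.Pairwise (· ≤ ·)) :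
    (rkeys l).Pairwise (· < ·) := pairwise_lt_rkeysAux l.length l h

theorem foldl_terms (f : Int × Int → String) :
    ∀ (l : List (Int × Int)) (acc : List String),
      l.foldl (fun a p => a ++ [f p]) acc = acc ++ l.map f := by
  intro l
  induction l with
  | nil => simp
  | cons p t ih => intro acc; simp [List.foldl_cons, ih]

theorem bLoop_acc : ∀ (rest : List Int) (cur cnt : Int) (acc : List String),
    bLoop cur cnt rest acc = acc ++ bLoop cur cnt rest [] := by
  intro rest
  induction rest with
  | nil => intro cur cnt acc; simp [bLoop]
  | cons x t ih =>
    intro cur cnt acc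
    by_cases h : x = cur
    · rw [bLoop, if_pos h, bLoop, if_pos h]
      exact ih cur (cnt + 1) acc
    · rw [bLoop, if_neg h, bLoop, if_neg h, ih x 1 (acc ++ [bTerm cur cnt]),
          ih x 1 ([] ++ [bTerm cur cnt])]
      simp

-- the core run-counting invariant: consuming a sorted tail t with all elements ≥ cur
theorem bLoop_spec : ∀ (t : List Int) (cur cnt : Int),
    t.Pairwise (· ≤ ·) → (∀ y ∈ t, cur ≤ y) →
    bLoop cur cnt t [] =
      ((cur, cnt + (t.count cur : Int)) ::
        (rkeys (t.filter (fun y => y ≠ cur))).map (fun k => (k, (t.count k : Int)))).map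
        (fun p => bTerm p.1 p.2) := by
  intro t
  induction t with
  | nil => intro cur cnt _ _; simp [bLoop, rkeys_nil]
  | cons x rest ih =>
    intro cur cnt hp hge
    rcases List.pairwise_cons.mp hp with ⟨hx, hrest⟩
    by_cases h : x = cur
    · subst h
      rw [bLoop, if_pos rfl, ih x (cnt + 1) hrest (fun y hy => hx y hy)]
      have h2 : (x :: rest).filter (fun y => y ≠ x) = rest.filter (fun y => y ≠ x) := by
        simp
      rw [h2]
      have htail : List.map (fun k => ((k : Int), ((x :: rest).count k : Int)))
            (rkeys (rest.filter (fun y => y ≠ x)))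
          = List.map (fun k => (k, (rest.count k : Int))) (rkeys (rest.filter (fun y => y ≠ x))) := by
        apply List.map_congr_left
        intro k hk
        have hne : k ≠ x := by
          have := List.of_mem_filter (mem_rkeys hk)
          simpa using this
        simp [Ne.symm hne]
      have hhead : (((x :: rest).count x : Nat) : Int) = 1 + ((rest.count x : Nat) : Int) := by
        rw [List.count_cons_self]
        push_cast
        ring
      simp only [List.map_cons, htail, hhead]
      congr 2
      ring
    · have hcx : cur < x := lt_of_le_of_ne (hge x (List.mem_cons_self ..)) (fun e => h e.symm)
      have hrest_gt : ∀ y ∈ rest, cur < y := fun y hy => lt_of_lt_of_le hcx (hx y hy)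
      rw [bLoop, if_neg h, bLoop_acc, ih x 1 hrest (fun y hy => hx y hy)]
      have hcount_cur : (x :: rest).count cur = 0 := by
        rw [List.count_eq_zero]
        intro hmem
        rcases List.mem_cons.mp hmem with he | hm
        · exact h he.symm
        · exact absurd rfl (ne_of_gt (hrest_gt cur hm))
      have hfil1 : (x :: rest).filter (fun y => y ≠ cur) = x :: rest := by
        apply List.filter_eq_self.mpr
        intro y hy
        rcases List.mem_cons.mp hy with he | hm
        · subst he; simpa using h
        · simpa using (ne_of_gt (hrest_gt y hm))
      rw [hcount_cur, hfil1, rkeys_cons]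
      have htail : List.map (fun k => ((k : Int), ((x :: rest).count k : Int)))
            (rkeys (rest.filter (fun y => y ≠ x)))
          = List.map (fun k => (k, (rest.count k : Int))) (rkeys (rest.filter (fun y => y ≠ x))) := by
        apply List.map_congr_left
        intro k hk
        have hne : k ≠ x := by
          have := List.of_mem_filter (mem_rkeys hk)
          simpa using this
        simp [Ne.symm hne]
      have hhead : (((x :: rest).count x : Nat) : Int) = 1 + ((rest.count x : Nat) : Int) := by
        rw [List.count_cons_self]
        push_cast
        ring
      simp only [List.map_cons, htail, hhead, Nat.cast_zero, add_zero, List.nil_append, List.singleton_append]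

theorem rkeys_sorted_eq (xs : List Int) :
    PySem.List.sorted (PySem.Set.ofList xs) (fun k => k) false
      = rkeys (PySem.List.sorted xs (fun x => x) false) := by
  set s := PySem.List.sorted xs (fun x => x) false with hs
  apply PySem.List.sorted_eq_of_perm_of_pairwise_lt
  · rw [List.perm_ext_iff_of_nodup (nodup_rkeys s) (PySem.Set.nodup_ofList xs)]
    intro a
    constructor
    · intro h
      rw [PySem.Set.mem_ofList]
      exact (PySem.List.mem_sorted _ _ _ _).mp (mem_rkeys h)
    · intro h
      rw [PySem.Set.mem_ofList] at h
      exact mem_rkeys_of_mem ((PySem.List.mem_sorted _ _ _ _).mpr h)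
  · exact pairwise_lt_rkeys (by simpa using PySem.List.sorted_pairwise xs (fun x => x))

-- A\'s sorted Counter items, as pairs over the sorted distinct values
theorem sorted_items_eq (xs : List Int) :
    PySem.List.sorted (PySem.Dict.counter xs).items (fun p => p.1) false
      = (PySem.List.sorted (PySem.Set.ofList xs) (fun k => k) false).map
          (fun k => (k, (xs.count k : Int))) := by
  apply PySem.List.sorted_eq_of_perm_of_pairwise_lt
  · rw [PySem.Dict.items_counter]
    exact List.Perm.map _ (PySem.List.sorted_perm _ _ _)
  · rw [List.pairwise_map]
    simpa using PySem.List.sorted_ofList_pairwise_lt xs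

-- ===== VERDICT (by name: the statement is the Claim_ definition above) =====
theorem factors_to_latex_spec : Claim_equal_factors_to_latex := by
  intro factors _
  unfold Spec_factors_to_latex factors_to_latex factors_to_latex_alt
  by_cases hnil : factors = []
  · subst hnil
    simp [PySem.List.sorted]
  · rw [if_neg hnil]
    have hsn : PySem.List.sorted factors (fun x => x) false ≠ [] := by
      rw [Ne, PySem.List.sorted_eq_nil_iff]; exact hnil
    rcases he : PySem.List.sorted factors (fun x => x) false with _ | ⟨x, rest⟩
    · exact absurd he hsn
    · have hpair : (x :: rest).Pairwise (· ≤ ·) := by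
        rw [← he]; simpa using PySem.List.sorted_pairwise factors (fun x => x)
      rcases List.pairwise_cons.mp hpair with ⟨hx, hrest⟩
      dsimp only
      have hbody : (fun (acc : List String) (p : Int × Int) =>
            if p.2 = 1 then acc ++ [PySem.Int.toStr p.1]
            else acc ++ [PySem.Int.toStr p.1 ++ "^{" ++ PySem.Int.toStr p.2 ++ "}"])
          = fun acc p => acc ++ [bTerm p.1 p.2] := by
        funext acc p
        by_cases hc : p.2 = 1 <;> simp [bTerm, hc]
      rw [bLoop_spec rest x 1 hrest hx, hbody, foldl_terms (fun p => bTerm p.1 p.2),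
          sorted_items_eq, rkeys_sorted_eq, he, rkeys_cons]
      have hperm : (x :: rest).Perm factors := by
        rw [← he]; exact PySem.List.sorted_perm _ _ _
      have hcnt : ∀ k : Int, factors.count k = (x :: rest).count k :=
        fun k => (hperm.count_eq k).symm
      refine congrArg (PySem.Str.join " \\cdot ") ?_
      simp only [List.nil_append, List.map_cons, List.map_map]
      congr 1
      · have hc : ((List.count x factors : Nat) : Int) = 1 + (List.count x rest : Nat) := by
          rw [hcnt x, List.count_cons_self]
          push_cast
          ring
        simp only [hc]
      · apply List.map_congr_left
        intro k hk
        have hne : k ≠ x := by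
          have := List.of_mem_filter (mem_rkeys hk)
          simpa using this
        have hc : factors.count k = rest.count k := by
          rw [hcnt k]; simp [Ne.symm hne]
        simp only [Function.comp_apply, hc]
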